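-- pv_equiv track=rewrite | github.com/jmenestr/OOpython | practice.py | missing_nums
-- ===== SOURCE A (Python) =====
-- def missing_nums(list_a,list_b):
--     needed_nums = []
--     for num in list_a:
--         diff = list_b.count(num)-list_a.count(num)
--         if diff > 0 and num not in needed_nums:
--             needed_nums.append(num)
--     needed_nums.sort()
--
--     return needed_nums
-- ===== SOURCE B (Python) =====
-- def missing_nums(list_a, list_b):
--     # Sort both lists, then one merge-style scan over the two sorted lists:
--     # compare run lengths of equal values; output is produced already sorted.
--     sa = sorted(list_a)
--     sb = sorted(list_b)
--     out = []
--     i = j = 0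
--     n, m = len(sa), len(sb)
--     while i < n:
--         v = sa[i]
--         ca = 0
--         while i < n and sa[i] == v:
--             ca += 1
--             i += 1
--         while j < m and sb[j] < v:
--             j += 1
--         cb = 0
--         while j < m and sb[j] == v:
--             cb += 1
--             j += 1
--         if cb > ca:
--             out.append(v)
--     return out
-- ===== Notes on version B (the rewrite author's own statement) =====
-- stated objective: faster
-- what changed: B sorts both lists once and does a single merge-style scan comparing run lengths of equal values (output emitted already sorted), instead of A's per-element count scans with a membership check and a final sort.
import Mathlib
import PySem

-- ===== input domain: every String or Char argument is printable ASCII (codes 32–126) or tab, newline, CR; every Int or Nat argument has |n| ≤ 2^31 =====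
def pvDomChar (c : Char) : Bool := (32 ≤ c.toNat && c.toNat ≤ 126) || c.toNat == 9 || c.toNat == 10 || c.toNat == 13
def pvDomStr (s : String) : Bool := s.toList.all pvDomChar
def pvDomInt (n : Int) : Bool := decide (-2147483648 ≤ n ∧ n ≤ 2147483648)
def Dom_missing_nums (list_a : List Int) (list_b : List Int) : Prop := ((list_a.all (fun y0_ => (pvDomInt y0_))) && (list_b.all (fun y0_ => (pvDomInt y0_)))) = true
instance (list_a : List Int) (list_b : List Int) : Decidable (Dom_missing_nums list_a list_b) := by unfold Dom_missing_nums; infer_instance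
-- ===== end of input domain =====

-- B replaces A's quadratic per-element count scans by sort-both + one merge-style
-- scan over runs of equal values, emitting the result already in sorted order (faster).

-- ===== PORT A =====
def missing_nums (list_a : List Int) (list_b : List Int) : List Int :=
  let needed_nums := list_a.foldl (fun needed_nums num =>
    let diff : Int := (PySem.List.count list_b num : Int) - (PySem.List.count list_a num : Int)
    if decide (diff > 0) && !(needed_nums.contains num) then needed_nums ++ [num] else needed_nums) []
  PySem.List.sorted needed_nums (fun x => x) false

-- ===== PORT B =====
-- B's outer while-loop: consume the run of the current value v from each sorted list
-- (takeWhile/dropWhile = the inner while-loops advancing i and j), emit v if its run in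
-- sb is longer.  Fuel = length of the first list (each step strictly shortens it).
def mnGo : Nat → List Int → List Int → List Int
  | 0, _, _ => []
  | _ + 1, [], _ => []
  | n + 1, v :: ta, sb =>
    let ca : Nat := 1 + (ta.takeWhile (· == v)).length
    let sa' := ta.dropWhile (· == v)
    let sb1 := sb.dropWhile (fun y => decide (y < v))
    let cb : Nat := (sb1.takeWhile (· == v)).length
    let sb' := sb1.dropWhile (· == v)
    if ca < cb then v :: mnGo n sa' sb' else mnGo n sa' sb'

def missing_nums_alt (list_a : List Int) (list_b : List Int) : List Int :=
  let sa := PySem.List.sorted list_a (fun x => x) false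
  let sb := PySem.List.sorted list_b (fun x => x) false
  mnGo sa.length sa sb

-- ===== PRECONDITION & SPEC =====
def Spec_missing_nums (list_a : List Int) (list_b : List Int) (out : List Int) : Prop := out = missing_nums_alt list_a list_b
instance (list_a : List Int) (list_b : List Int) (out : List Int) : Decidable (Spec_missing_nums list_a list_b out) := by unfold Spec_missing_nums; infer_instance

-- ===== CLAIM (what is proved, stated in full; the proofs are below) =====
def Claim_equal_missing_nums : Prop := ∀ (list_a : List Int) (list_b : List Int), Dom_missing_nums list_a list_b → Spec_missing_nums list_a list_b (missing_nums list_a list_b)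

-- ===== LEMMAS AND PROOFS =====

-- A's loop, generalized: starting from an accumulator that is s filtered by p,
-- the loop computes (Set.update s l) filtered by p.
theorem missing_loop_filter (p : Int → Bool) :
    ∀ (l s : List Int),
      l.foldl (fun acc x => if p x && !(acc.contains x) then acc ++ [x] else acc) (s.filter p)
        = (PySem.Set.update s l).filter p := by
  intro l
  induction l with
  | nil => intro s; simp [PySem.Set.update]
  | cons x t ih =>
    intro s
    by_cases hx : x ∈ s
    · have hc : (s.filter p).contains x = p x := by
        cases hp : p x with
        | true => simp [List.contains_eq_mem, List.mem_filter, hx, hp]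
        | false => simp [List.contains_eq_mem, List.mem_filter, hp]
      have hadd : PySem.Set.add s x = s := by
        simp [PySem.Set.add, PySem.Set.contains, List.contains_eq_mem, hx]
      have hstep : (if p x && !((s.filter p).contains x) then (s.filter p) ++ [x] else (s.filter p)) = s.filter p := by
        rw [hc]; cases p x <;> simp
      calc (x :: t).foldl (fun acc x => if p x && !(acc.contains x) then acc ++ [x] else acc) (s.filter p)
          = t.foldl (fun acc x => if p x && !(acc.contains x) then acc ++ [x] else acc) (s.filter p) := by
            simp only [List.foldl_cons, hstep]
        _ = (PySem.Set.update s t).filter p := ih s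
        _ = (PySem.Set.update s (x :: t)).filter p := by
            simp [PySem.Set.update, hadd]
    · have hc : (s.filter p).contains x = false := by
        simp only [List.contains_eq_mem, decide_eq_false_iff_not, List.mem_filter]
        intro hmem; exact hx hmem.1
      have hadd : PySem.Set.add s x = s ++ [x] := by
        simp [PySem.Set.add, PySem.Set.contains, List.contains_eq_mem, hx]
      have hfilt : (s ++ [x]).filter p = if p x then s.filter p ++ [x] else s.filter p := by
        cases hp : p x <;> simp [List.filter_append, hp]
      calc (x :: t).foldl (fun acc x => if p x && !(acc.contains x) then acc ++ [x] else acc) (s.filter p)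
          = t.foldl (fun acc x => if p x && !(acc.contains x) then acc ++ [x] else acc)
              (if p x && !((s.filter p).contains x) then (s.filter p) ++ [x] else (s.filter p)) := by
            simp only [List.foldl_cons]
        _ = t.foldl (fun acc x => if p x && !(acc.contains x) then acc ++ [x] else acc) ((s ++ [x]).filter p) := by
            rw [hc, hfilt]; cases hp : p x with
            | true => simp
            | false => simp
        _ = (PySem.Set.update (s ++ [x]) t).filter p := ih (s ++ [x])
        _ = (PySem.Set.update s (x :: t)).filter p := by
            simp [PySem.Set.update, hadd]

-- in a nondecreasing list whose elements are all ≥ v, everything after the leading run of v's is > v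
theorem drop_run_lt (v : Int) :
    ∀ l : List Int, l.Pairwise (· ≤ ·) → (∀ x ∈ l, v ≤ x) →
      ∀ w ∈ l.dropWhile (· == v), v < w := by
  intro l
  induction l with
  | nil => intro _ _ w hw; simp [List.dropWhile] at hw
  | cons x t ih =>
    intro hpw hge w hw
    by_cases hx : x = v
    · rw [List.dropWhile_cons_of_pos (by simp [hx])] at hw
      exact ih hpw.of_cons (fun y hy => hge y (List.mem_cons_of_mem _ hy)) w hw
    · rw [List.dropWhile_cons_of_neg (by simp [hx])] at hw
      have hvx : v < x := lt_of_le_of_ne (hge x (List.mem_cons_self)) (Ne.symm hx)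
      rcases List.mem_cons.mp hw with rfl | hw'
      · exact hvx
      · exact lt_of_lt_of_le hvx (List.rel_of_pairwise_cons hpw hw')

-- after dropping the elements < v from a nondecreasing list, everything left is ≥ v
theorem drop_lt_ge (v : Int) :
    ∀ l : List Int, l.Pairwise (· ≤ ·) →
      ∀ w ∈ l.dropWhile (fun y => decide (y < v)), v ≤ w := by
  intro l
  induction l with
  | nil => intro _ w hw; simp [List.dropWhile] at hw
  | cons x t ih =>
    intro hpw w hw
    by_cases hx : x < v
    · rw [List.dropWhile_cons_of_pos (by simpa using hx)] at hw
      exact ih hpw.of_cons w hw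
    · rw [List.dropWhile_cons_of_neg (by simpa using hx)] at hw
      rcases List.mem_cons.mp hw with rfl | hw'
      · exact le_of_not_gt hx
      · exact le_trans (le_of_not_gt hx) (List.rel_of_pairwise_cons hpw hw')

-- a leading run of copies of the head contributes nothing new to the set
theorem ofList_cons_run (v : Int) :
    ∀ (r l : List Int), (∀ x ∈ r, x = v) →
      PySem.Set.ofList (v :: (r ++ l)) = PySem.Set.ofList (v :: l) := by
  intro r
  induction r with
  | nil => intro l _; rfl
  | cons y r' ih =>
    intro l hr
    have hy : y = v := hr y (List.mem_cons_self)
    rw [hy]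
    have h1 : PySem.Set.ofList (v :: (v :: r' ++ l)) = (r' ++ l).foldl PySem.Set.add [v] := by
      show (v :: (v :: r' ++ l)).foldl PySem.Set.add [] = (r' ++ l).foldl PySem.Set.add [v]
      simp only [List.cons_append, List.foldl_cons]
      have h2 : PySem.Set.add (PySem.Set.add [] v) v = [v] := by
        simp [PySem.Set.add, PySem.Set.contains]
      rw [h2]
    rw [h1]
    exact ih l (fun x hx => hr x (List.mem_cons_of_mem _ hx))

-- cons of a non-member
theorem ofList_cons_notmem {v : Int} {l : List Int} (hv : v ∉ l) :
    PySem.Set.ofList (v :: l) = v :: PySem.Set.ofList l := by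
  have h1 : PySem.Set.ofList (v :: l) = PySem.Set.update [v] l := rfl
  rw [h1, PySem.Set.update_eq_append_filter]
  have : (PySem.Set.ofList l).filter (fun y => !(PySem.Set.contains [v] y)) = PySem.Set.ofList l := by
    apply List.filter_eq_self.mpr
    intro y hy
    have hyl : y ∈ l := (PySem.Set.mem_ofList _ _).mp hy
    have : y ≠ v := fun h => hv (h ▸ hyl)
    simp [PySem.Set.contains, this]
  rw [this]
  rfl

-- set(xs) keeps first occurrences in order: it is a sublist of xs
theorem ofList_sublist : ∀ (xs : List Int), (PySem.Set.ofList xs).Sublist xs := by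
  intro xs
  induction xs using List.reverseRecOn with
  | nil => simp [PySem.Set.ofList]
  | append_singleton l x ih =>
    rw [PySem.Set.ofList_append_singleton, PySem.Set.add_eq_ite]
    split
    · exact ih.trans (List.sublist_append_left l [x])
    · exact List.Sublist.append ih (List.Sublist.refl [x])

-- the merge scan computes exactly: distinct values of sa (in order) whose count in sb exceeds their count in sa
theorem mnGo_eq :
    ∀ (n : Nat) (sa sb : List Int), sa.length ≤ n →
      sa.Pairwise (· ≤ ·) → sb.Pairwise (· ≤ ·) →
      mnGo n sa sb = (PySem.Set.ofList sa).filter (fun u => decide (sa.count u < sb.count u)) := by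
  intro n
  induction n with
  | zero =>
    intro sa sb hlen _ _
    have : sa = [] := List.length_eq_zero_iff.mp (Nat.le_zero.mp hlen)
    subst this; rfl
  | succ n ih =>
    intro sa sb hlen ha hb
    match sa with
    | [] => rfl
    | v :: ta =>
      -- names for the six takeWhile/dropWhile pieces
      have hta : ta.takeWhile (· == v) ++ ta.dropWhile (· == v) = ta :=
        List.takeWhile_append_dropWhile
      have hsb : sb.takeWhile (fun y => decide (y < v)) ++ sb.dropWhile (fun y => decide (y < v)) = sb :=
        List.takeWhile_append_dropWhile
      have hsb1 : (sb.dropWhile (fun y => decide (y < v))).takeWhile (· == v) ++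
          (sb.dropWhile (fun y => decide (y < v))).dropWhile (· == v) = sb.dropWhile (fun y => decide (y < v)) :=
        List.takeWhile_append_dropWhile
      have hr : ∀ x ∈ ta.takeWhile (· == v), x = v := by
        intro x hx; have := List.mem_takeWhile_imp hx; simpa using this
      have hpw_ta : ta.Pairwise (· ≤ ·) := ha.of_cons
      have hge_ta : ∀ x ∈ ta, v ≤ x := fun x hx => List.rel_of_pairwise_cons ha hx
      have hgt_sa' : ∀ w ∈ ta.dropWhile (· == v), v < w := drop_run_lt v ta hpw_ta hge_ta
      have hnm_sa' : v ∉ ta.dropWhile (· == v) := fun h => absurd (hgt_sa' v h) (lt_irrefl v)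
      have ht1 : ∀ x ∈ sb.takeWhile (fun y => decide (y < v)), x < v := by
        intro x hx; have := List.mem_takeWhile_imp hx; simpa using this
      have hpw_sb1 : (sb.dropWhile (fun y => decide (y < v))).Pairwise (· ≤ ·) :=
        List.Pairwise.sublist (List.dropWhile_sublist _) hb
      have hge_sb1 : ∀ w ∈ sb.dropWhile (fun y => decide (y < v)), v ≤ w := drop_lt_ge v sb hb
      have hrb : ∀ x ∈ (sb.dropWhile (fun y => decide (y < v))).takeWhile (· == v), x = v := by
        intro x hx; have := List.mem_takeWhile_imp hx; simpa using this
      have hgt_sb' : ∀ w ∈ (sb.dropWhile (fun y => decide (y < v))).dropWhile (· == v), v < w :=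
        drop_run_lt v _ hpw_sb1 hge_sb1
      have hpw_sa' : (ta.dropWhile (· == v)).Pairwise (· ≤ ·) :=
        List.Pairwise.sublist (List.dropWhile_sublist _) hpw_ta
      have hpw_sb' : ((sb.dropWhile (fun y => decide (y < v))).dropWhile (· == v)).Pairwise (· ≤ ·) :=
        List.Pairwise.sublist (List.dropWhile_sublist _) hpw_sb1
      -- run lengths are the counts of v
      have hca : (v :: ta).count v = 1 + (ta.takeWhile (· == v)).length := by
        rw [List.count_cons_self]
        conv_lhs => rw [← hta]
        rw [List.count_append]
        have h1 : (ta.takeWhile (· == v)).count v = (ta.takeWhile (· == v)).length :=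
          List.count_eq_length.mpr (fun b hb' => (hr b hb').symm)
        have h2 : (ta.dropWhile (· == v)).count v = 0 := List.count_eq_zero.mpr hnm_sa'
        omega
      have hcb : sb.count v = ((sb.dropWhile (fun y => decide (y < v))).takeWhile (· == v)).length := by
        conv_lhs => rw [← hsb]
        rw [List.count_append]
        conv_lhs => rw [← hsb1]
        rw [List.count_append]
        have h1 : (sb.takeWhile (fun y => decide (y < v))).count v = 0 :=
          List.count_eq_zero.mpr (fun h => absurd (ht1 v h) (lt_irrefl v))
        have h2 : ((sb.dropWhile (fun y => decide (y < v))).takeWhile (· == v)).count v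
            = ((sb.dropWhile (fun y => decide (y < v))).takeWhile (· == v)).length :=
          List.count_eq_length.mpr (fun b hb' => (hrb b hb').symm)
        have h3 : ((sb.dropWhile (fun y => decide (y < v))).dropWhile (· == v)).count v = 0 :=
          List.count_eq_zero.mpr (fun h => absurd (hgt_sb' v h) (lt_irrefl v))
        omega
      -- values beyond the head run keep their counts
      have hcw : ∀ w, v < w → (v :: ta).count w = (ta.dropWhile (· == v)).count w ∧
          sb.count w = ((sb.dropWhile (fun y => decide (y < v))).dropWhile (· == v)).count w := by
        intro w hw
        have hwv : w ≠ v := ne_of_gt hw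
        constructor
        · have h0 : (v :: ta).count w = ta.count w := by simp [Ne.symm hwv]
          rw [h0]
          conv_lhs => rw [← hta]
          rw [List.count_append]
          have h1 : (ta.takeWhile (· == v)).count w = 0 :=
            List.count_eq_zero.mpr (fun h => hwv (hr w h))
          omega
        · conv_lhs => rw [← hsb]
          rw [List.count_append]
          conv_lhs => rw [← hsb1]
          rw [List.count_append]
          have h1 : (sb.takeWhile (fun y => decide (y < v))).count w = 0 :=
            List.count_eq_zero.mpr (fun h => absurd (lt_trans (ht1 w h) hw) (lt_irrefl w))
          have h2 : ((sb.dropWhile (fun y => decide (y < v))).takeWhile (· == v)).count w = 0 :=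
            List.count_eq_zero.mpr (fun h => hwv (hrb w h))
          omega
      -- set of the whole list = head cons set of the tail beyond the run
      have hof : PySem.Set.ofList (v :: ta) = v :: PySem.Set.ofList (ta.dropWhile (· == v)) := by
        conv_lhs => rw [← hta]
        rw [ofList_cons_run v _ _ hr]
        exact ofList_cons_notmem hnm_sa'
      -- the filtered tail only mentions counts of the suffixes
      have htail : (PySem.Set.ofList (ta.dropWhile (· == v))).filter
            (fun u => decide ((v :: ta).count u < sb.count u))
          = (PySem.Set.ofList (ta.dropWhile (· == v))).filter
            (fun u => decide ((ta.dropWhile (· == v)).count u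
              < ((sb.dropWhile (fun y => decide (y < v))).dropWhile (· == v)).count u)) := by
        apply List.filter_congr
        intro u hu
        have hvu : v < u := hgt_sa' u ((PySem.Set.mem_ofList _ _).mp hu)
        rw [(hcw u hvu).1, (hcw u hvu).2]
      -- induction hypothesis on the two suffixes
      have hlen' : (ta.dropWhile (· == v)).length ≤ n := by
        have := List.length_dropWhile_le (· == v) ta
        simp only [List.length_cons] at hlen
        omega
      have hih := ih (ta.dropWhile (· == v)) ((sb.dropWhile (fun y => decide (y < v))).dropWhile (· == v))
        hlen' hpw_sa' hpw_sb'
      -- assemble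
      show (if 1 + (ta.takeWhile (· == v)).length
              < ((sb.dropWhile (fun y => decide (y < v))).takeWhile (· == v)).length
            then v :: mnGo n (ta.dropWhile (· == v)) ((sb.dropWhile (fun y => decide (y < v))).dropWhile (· == v))
            else mnGo n (ta.dropWhile (· == v)) ((sb.dropWhile (fun y => decide (y < v))).dropWhile (· == v)))
          = (PySem.Set.ofList (v :: ta)).filter (fun u => decide ((v :: ta).count u < sb.count u))
      rw [hof, List.filter_cons, hih, htail]
      by_cases hc : 1 + (ta.takeWhile (· == v)).length
          < ((sb.dropWhile (fun y => decide (y < v))).takeWhile (· == v)).length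
      · rw [if_pos hc, if_pos (by rw [hca, hcb]; exact decide_eq_true hc)]
      · rw [if_neg hc, if_neg (by rw [hca, hcb]; simpa using hc)]

-- ===== VERDICT (by name: the statement is the Claim_ definition above) =====
theorem missing_nums_spec : Claim_equal_missing_nums := by
  intro list_a list_b _
  show missing_nums list_a list_b = missing_nums_alt list_a list_b
  have hloop := missing_loop_filter
      (fun num => decide ((PySem.List.count list_b num : Int) - (PySem.List.count list_a num : Int) > 0))
      list_a []
  simp only [List.filter_nil] at hloop
  have hq : (fun num => decide ((PySem.List.count list_b num : Int) - (PySem.List.count list_a num : Int) > 0))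
      = (fun u => decide (list_a.count u < list_b.count u)) := by
    funext u
    simp only [PySem.List.count_eq, decide_eq_decide]
    omega
  have hA : missing_nums list_a list_b
      = PySem.List.sorted ((PySem.Set.ofList list_a).filter (fun u => decide (list_a.count u < list_b.count u)))
          (fun x => x) false := by
    simp only [missing_nums, hloop, PySem.Set.update_nil_left, hq]
  have hpw_a : (PySem.List.sorted list_a (fun x => x) false).Pairwise (· ≤ ·) :=
    PySem.List.sorted_pairwise list_a (fun x => x)
  have hpw_b : (PySem.List.sorted list_b (fun x => x) false).Pairwise (· ≤ ·) :=
    PySem.List.sorted_pairwise list_b (fun x => x)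
  have hB : missing_nums_alt list_a list_b
      = (PySem.Set.ofList (PySem.List.sorted list_a (fun x => x) false)).filter
          (fun u => decide (list_a.count u < list_b.count u)) := by
    show mnGo (PySem.List.sorted list_a (fun x => x) false).length
        (PySem.List.sorted list_a (fun x => x) false) (PySem.List.sorted list_b (fun x => x) false) = _
    rw [mnGo_eq _ _ _ le_rfl hpw_a hpw_b]
    apply List.filter_congr
    intro u _
    rw [(PySem.List.sorted_perm list_a (fun x => x) false).count_eq u,
        (PySem.List.sorted_perm list_b (fun x => x) false).count_eq u]
  rw [hA, hB]
  -- the filtered set of the sorted list is strictly increasing and a permutation of the unsorted one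
  apply PySem.List.sorted_eq_of_perm_of_pairwise_lt
  · apply (List.perm_ext_iff_of_nodup ((PySem.Set.nodup_ofList _).filter _)
      ((PySem.Set.nodup_ofList _).filter _)).mpr
    intro x
    simp only [List.mem_filter, PySem.Set.mem_ofList, PySem.List.mem_sorted]
  · have hle : (PySem.Set.ofList (PySem.List.sorted list_a (fun x => x) false)).Pairwise (· ≤ ·) :=
      List.Pairwise.sublist (ofList_sublist _) hpw_a
    have hne : (PySem.Set.ofList (PySem.List.sorted list_a (fun x => x) false)).Pairwise (· ≠ ·) :=
      PySem.Set.nodup_ofList _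
    exact ((hle.and hne).imp (fun h => lt_of_le_of_ne h.1 h.2)).filter _
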